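-- pv_equiv track=rewrite | github.com/pjrowe/build_blocks | hackerrank_problem_solving.py | funnyString
-- ===== SOURCE A (Python) =====
-- def funnyString(s):
--     """funnyString."""
--     x = [abs(ord(s[i]) - ord(s[i - 1])) for i in range(1, len(s))]
--     y = [abs(ord(s[len(s) - 1 - i]) - ord(s[len(s) - 1 - (i - 1)]))
--          for i in range(1, len(s))]
--
--     if x == y:
--         return 'Funny'
--     else:
--         return 'Not Funny'
-- ===== SOURCE B (Python) =====
-- def funnyString(s):
--     """funnyString: compute the adjacent-difference list once and check it is a
--     palindrome with a two-pointer scan (no second reversed list is built)."""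
--     d = [abs(ord(s[i]) - ord(s[i - 1])) for i in range(1, len(s))]
--     lo, hi = 0, len(d) - 1
--     while lo < hi:
--         if d[lo] != d[hi]:
--             return 'Not Funny'
--         lo += 1
--         hi -= 1
--     return 'Funny'
-- ===== Notes on version B (the rewrite author's own statement) =====
-- stated objective: faster
-- what changed: Instead of building the adjacent-difference list twice (forward and backward) and comparing the two whole lists, B builds the difference list once and checks it is a palindrome in place with a two-pointer scan that stops at the first mismatch.
import Mathlib
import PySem

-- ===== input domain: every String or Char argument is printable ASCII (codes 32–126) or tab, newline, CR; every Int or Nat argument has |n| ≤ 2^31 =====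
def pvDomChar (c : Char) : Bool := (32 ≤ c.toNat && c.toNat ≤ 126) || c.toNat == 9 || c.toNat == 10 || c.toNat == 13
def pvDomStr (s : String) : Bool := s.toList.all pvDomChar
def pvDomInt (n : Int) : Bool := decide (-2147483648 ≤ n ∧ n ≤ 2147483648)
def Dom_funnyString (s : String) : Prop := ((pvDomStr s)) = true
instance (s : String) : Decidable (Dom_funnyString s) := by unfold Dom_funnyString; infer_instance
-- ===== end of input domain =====

-- B builds the adjacent-difference list once and checks palindromicity with a
-- two-pointer scan, instead of A's second reversed list and whole-list compare.


-- ===== PORT A =====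
-- ord(s[i]) for an Int index; the 'none' branch is unreachable for the indices
-- either program uses (Python would raise IndexError there).
def pvOrd (s : String) (i : Int) : Int :=
  match PySem.Str.pyGet? s i with
  | some c => (c.toNat : Int)
  | none => 0

def funnyString (s : String) : String :=
  let n : Int := PySem.Str.len s
  let x := (PySem.List.pyRange 1 n 1).map (fun i => |pvOrd s i - pvOrd s (i - 1)|)
  let y := (PySem.List.pyRange 1 n 1).map
      (fun i => |pvOrd s (n - 1 - i) - pvOrd s (n - 1 - (i - 1))|)
  if x = y then "Funny" else "Not Funny"

-- ===== PORT B =====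
-- the 'while lo < hi' two-pointer scan of Source B
def pvLoop (d : List Int) (lo hi : Nat) : Bool :=
  if lo < hi then
    if PySem.List.pyGetD d (lo : Int) 0 ≠ PySem.List.pyGetD d (hi : Int) 0 then false
    else pvLoop d (lo + 1) (hi - 1)
  else true
termination_by hi - lo

def funnyString_alt (s : String) : String :=
  let d := (PySem.List.pyRange 1 (PySem.Str.len s) 1).map
      (fun i => |pvOrd s i - pvOrd s (i - 1)|)
  if pvLoop d 0 (d.length - 1) then "Funny" else "Not Funny"

-- ===== PRECONDITION & SPEC =====
def Spec_funnyString (s : String) (out : String) : Prop := out = funnyString_alt s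
instance (s : String) (out : String) : Decidable (Spec_funnyString s out) := by unfold Spec_funnyString; infer_instance

-- ===== CLAIM (what is proved, stated in full; the proofs are below) =====
def Claim_equal_funnyString : Prop := ∀ (s : String), Dom_funnyString s → Spec_funnyString s (funnyString s)

-- ===== LEMMAS AND PROOFS =====

-- the two-pointer loop accepts iff every in-window pair (i, lo+hi-i) matches
theorem pvLoop_iff (d : List Int) (lo hi : Nat) :
    pvLoop d lo hi = true ↔
      ∀ i, lo ≤ i → i ≤ hi → d.getD i 0 = d.getD (lo + hi - i) 0 := by
  induction lo, hi using pvLoop.induct d with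
  | case1 lo hi hlt hne =>
      rw [pvLoop, if_pos hlt, if_pos hne]
      simp only [PySem.List.pyGetD_natCast] at hne
      constructor
      · intro h; cases h
      · intro h
        exact absurd (by simpa [Nat.add_sub_cancel_left] using h lo le_rfl hlt.le) hne
  | case2 lo hi hlt heq ih =>
      rw [pvLoop, if_pos hlt, if_neg heq]
      simp only [not_not, PySem.List.pyGetD_natCast] at heq
      rw [ih]
      constructor
      · intro h i h1 h2
        rcases eq_or_lt_of_le h1 with rfl | h1'
        · simpa [Nat.add_sub_cancel_left] using heq
        · rcases eq_or_lt_of_le h2 with rfl | h2'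
          · simpa [Nat.add_sub_cancel] using heq.symm
          · have := h i (by omega) (by omega)
            have harith : lo + 1 + (hi - 1) - i = lo + hi - i := by omega
            rwa [harith] at this
      · intro h i h1 h2
        have := h i (by omega) (by omega)
        have harith : lo + 1 + (hi - 1) - i = lo + hi - i := by omega
        rwa [harith]
  | case3 lo hi hlt =>
      rw [pvLoop, if_neg hlt]
      constructor
      · intro _ i h1 h2
        have : i = lo + hi - i := by omega
        rw [← this]
      · intro _; rfl

-- the pair condition at window (0, len-1) says exactly "d is a palindrome"
theorem pairs_iff_reverse (d : List Int) :
    (∀ i, 0 ≤ i → i ≤ d.length - 1 → d.getD i 0 = d.getD (0 + (d.length - 1) - i) 0)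
      ↔ d = d.reverse := by
  rcases eq_or_ne d [] with rfl | hne
  · simp
  · have hpos : 0 < d.length := List.length_pos_iff.mpr hne
    constructor
    · intro h
      apply List.ext_getElem (by simp)
      intro i hi _
      have hh := h i (Nat.zero_le _) (by omega)
      rw [List.getD_eq_getElem d 0 hi, List.getD_eq_getElem d 0 (by omega)] at hh
      rw [List.getElem_reverse]
      convert hh using 2
      omega
    · intro h i _ hle
      have hi : i < d.length := by omega
      have hi' : d.length - 1 - i < d.length := by omega
      rw [List.getD_eq_getElem d 0 hi, List.getD_eq_getElem d 0 (by simpa using hi')]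
      have hrev := List.getElem_of_eq h hi
      rw [List.getElem_reverse] at hrev
      convert hrev using 2
      omega

-- both difference lists, as maps over List.range
theorem pyRange_map (n : Int) (f : Int → Int) :
    (PySem.List.pyRange 1 n 1).map f
      = (List.range (n - 1).toNat).map (fun (k : Nat) => f (1 + (k : Int))) := by
  rw [PySem.List.pyRange_one, List.map_map]
  rfl

-- A's backward list y is the reverse of its forward list x
theorem y_eq_reverse (s : String) :
    (PySem.List.pyRange 1 (PySem.Str.len s) 1).map
        (fun i => |pvOrd s (PySem.Str.len s - 1 - i) - pvOrd s (PySem.Str.len s - 1 - (i - 1))|)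
      = ((PySem.List.pyRange 1 (PySem.Str.len s) 1).map
        (fun i => |pvOrd s i - pvOrd s (i - 1)|)).reverse := by
  rw [pyRange_map, pyRange_map]
  set n : Int := PySem.Str.len s with hn
  have hn0 : 0 ≤ n := by simp [hn, PySem.Str.len_eq]
  set m : Nat := (n - 1).toNat with hm
  apply List.ext_getElem (by simp)
  intro i hi _
  simp only [List.getElem_reverse, List.getElem_map, List.getElem_range, List.length_map,
    List.length_range]
  have hi' : i < m := by simpa using hi
  have e1 : n - 1 - (1 + (i : Int)) = 1 + ((m - 1 - i : Nat) : Int) - 1 := by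
    omega
  have e2 : n - 1 - (1 + (i : Int) - 1) = 1 + ((m - 1 - i : Nat) : Int) := by
    omega
  rw [e1, e2, abs_sub_comm]

-- ===== VERDICT (by name: the statement is the Claim_ definition above) =====
theorem funnyString_spec : Claim_equal_funnyString := by
  intro s _
  unfold Spec_funnyString funnyString funnyString_alt
  simp only []
  rw [y_eq_reverse s]
  set d := (PySem.List.pyRange 1 (PySem.Str.len s) 1).map
      (fun i => |pvOrd s i - pvOrd s (i - 1)|) with hd
  by_cases hpal : d = d.reverse
  · rw [if_pos hpal, if_pos]
    rw [pvLoop_iff]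
    intro i h1 h2
    exact (pairs_iff_reverse d).mpr hpal i h1 h2
  · rw [if_neg hpal, if_neg]
    intro hloop
    exact hpal ((pairs_iff_reverse d).mp (by
      intro i h1 h2
      exact (pvLoop_iff d 0 (d.length - 1)).mp hloop i h1 h2))
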